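-- pv_equiv track=rewrite | github.com/calleschulers/CATMAID | django/applications/catmaid/control/node.py | split_and_filter_id_rows
-- ===== SOURCE A (Python) =====
-- def split_and_filter_id_rows(rows, part_2_start, total_len):
--     # A list of tuples, each tuple containing the selected columns for each node
--     # The id is the first element of each tuple
--     nodes = []
--     # A set of unique node IDs
--     node_ids = set()
--
--     for row in rows:
--         t1id = row[0]
--         if t1id not in node_ids:
--             node_ids.add(t1id)
--             nodes.append(row[0:part_2_start])
--         t2id = row[part_2_start]
--         if t2id and t2id not in node_ids:
--             node_ids.add(t2id)
--             nodes.append(row[part_2_start:total_len])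
--
--     return node_ids, nodes
-- ===== SOURCE B (Python) =====
-- def split_and_filter_id_rows(rows, part_2_start, total_len):
--     # Phase 1: build a flat candidate list of (id, record) pairs.
--     # The first slice of each row is always a candidate; the second slice
--     # is a candidate only when its id is truthy.
--     candidates = []
--     for row in rows:
--         candidates.append((row[0], row[0:part_2_start]))
--         t2id = row[part_2_start]
--         if t2id:
--             candidates.append((t2id, row[part_2_start:total_len]))
--     # Phase 2: order-preserving dedup by id over the candidate stream.
--     node_ids = set()
--     nodes = []
--     for nid, rec in candidates:
--         if nid not in node_ids:
--             node_ids.add(nid)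
--             nodes.append(rec)
--     return node_ids, nodes
-- ===== Notes on version B (the rewrite author's own statement) =====
-- stated objective: alternative
-- what changed: A's single interleaved pass is replaced by a generate-then-filter pipeline: phase 1 builds a flat candidate list of (id, record) pairs (second slice gated on truthiness), phase 2 is a separate order-preserving dedup over that stream.
-- outside the precondition, e.g. on split_and_filter_id_rows([(None, 0)], 1, 2): A returns ({None}, [(None,)]), B returns ({None}, [(None,)])
import Mathlib
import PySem

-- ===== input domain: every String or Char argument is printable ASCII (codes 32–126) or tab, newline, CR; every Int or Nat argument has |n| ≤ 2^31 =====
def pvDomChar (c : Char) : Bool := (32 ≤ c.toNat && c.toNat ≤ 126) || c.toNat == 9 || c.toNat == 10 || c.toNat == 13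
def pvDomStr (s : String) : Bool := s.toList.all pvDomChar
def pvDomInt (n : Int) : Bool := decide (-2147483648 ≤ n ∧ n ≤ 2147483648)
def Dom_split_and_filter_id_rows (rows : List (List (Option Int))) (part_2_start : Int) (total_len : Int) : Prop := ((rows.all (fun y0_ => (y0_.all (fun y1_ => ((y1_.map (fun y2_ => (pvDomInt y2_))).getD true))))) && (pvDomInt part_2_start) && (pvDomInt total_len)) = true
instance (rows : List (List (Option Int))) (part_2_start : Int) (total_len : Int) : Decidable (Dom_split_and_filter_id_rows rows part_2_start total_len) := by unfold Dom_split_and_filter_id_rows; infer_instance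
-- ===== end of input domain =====

-- ===== PORT A =====
-- B restructures A's single interleaved pass into a candidate-generation pass
-- followed by a separate order-preserving dedup pass (objective: alternative).
def pvTruthy (x : Option Int) : Bool :=
  match x with
  | none => false
  | some v => v != 0

-- one iteration of A's loop body (state = (node_ids, nodes)); the `none` arms
-- of the matches are the inputs where Python raises IndexError (outside Pre_)
def pvStepA (part_2_start : Int) (total_len : Int)
    (st : PySem.Set (Option Int) × List (List (Option Int))) (row : List (Option Int)) :
    PySem.Set (Option Int) × List (List (Option Int)) :=
  match PySem.List.pyGet? row 0 with
  | none => st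
  | some t1id =>
    let st1 := if PySem.Set.contains st.1 t1id then st
               else (PySem.Set.add st.1 t1id, st.2 ++ [PySem.List.slice row (some 0) (some part_2_start)])
    match PySem.List.pyGet? row part_2_start with
    | none => st1
    | some t2id =>
      if pvTruthy t2id && !(PySem.Set.contains st1.1 t2id) then
        (PySem.Set.add st1.1 t2id, st1.2 ++ [PySem.List.slice row (some part_2_start) (some total_len)])
      else st1

def split_and_filter_id_rows (rows : List (List (Option Int))) (part_2_start : Int) (total_len : Int) : List Int × List (List (Option Int)) :=
  let st := rows.foldl (pvStepA part_2_start total_len) (PySem.Set.empty, [])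
  -- under Pre_ the set never contains `none`; filterMap id realises the List Int result type
  (st.1.filterMap id, st.2)

-- ===== PORT B =====
-- phase 1: candidates contributed by one row (the `none` arms = IndexError, outside Pre_)
def pvCandRow (part_2_start : Int) (total_len : Int) (row : List (Option Int)) :
    List (Option Int × List (Option Int)) :=
  match PySem.List.pyGet? row 0 with
  | none => []
  | some t1id =>
    (t1id, PySem.List.slice row (some 0) (some part_2_start)) ::
      (match PySem.List.pyGet? row part_2_start with
       | none => []
       | some t2id =>
         if pvTruthy t2id then [(t2id, PySem.List.slice row (some part_2_start) (some total_len))]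
         else [])

-- phase 2: one step of the order-preserving dedup over the candidate stream
def pvDedupStep (st : PySem.Set (Option Int) × List (List (Option Int)))
    (c : Option Int × List (Option Int)) :
    PySem.Set (Option Int) × List (List (Option Int)) :=
  if PySem.Set.contains st.1 c.1 then st else (PySem.Set.add st.1 c.1, st.2 ++ [c.2])

def split_and_filter_id_rows_alt (rows : List (List (Option Int))) (part_2_start : Int) (total_len : Int) : List Int × List (List (Option Int)) :=
  let candidates := rows.flatMap (pvCandRow part_2_start total_len)
  let st := candidates.foldl pvDedupStep (PySem.Set.empty, [])
  (st.1.filterMap id, st.2)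

-- ===== PRECONDITION & SPEC =====
-- Pre_ excludes rows where row[0] or row[part_2_start] raises IndexError, and rows whose
-- first element is None: there A returns a set containing None, which is not a List Int.
def Pre_split_and_filter_id_rows (rows : List (List (Option Int))) (part_2_start : Int) (total_len : Int) : Prop :=
  ∀ row ∈ rows, row.head? ≠ some none ∧ PySem.Raise.InRange row.length part_2_start
instance (rows : List (List (Option Int))) (part_2_start : Int) (total_len : Int) : Decidable (Pre_split_and_filter_id_rows rows part_2_start total_len) := by unfold Pre_split_and_filter_id_rows; infer_instance
def pvWitness_split_and_filter_id_rows : List (List (Option Int)) × Int × Int := ([[some 1, some 2]], 1, 2)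

def Spec_split_and_filter_id_rows (rows : List (List (Option Int))) (part_2_start : Int) (total_len : Int) (out : List Int × List (List (Option Int))) : Prop := out = split_and_filter_id_rows_alt rows part_2_start total_len
instance (rows : List (List (Option Int))) (part_2_start : Int) (total_len : Int) (out : List Int × List (List (Option Int))) : Decidable (Spec_split_and_filter_id_rows rows part_2_start total_len out) := by unfold Spec_split_and_filter_id_rows; infer_instance

-- ===== CLAIM (what is proved, stated in full; the proofs are below) =====
def Claim_equal_split_and_filter_id_rows : Prop := ∀ (rows : List (List (Option Int))) (part_2_start : Int) (total_len : Int), Dom_split_and_filter_id_rows rows part_2_start total_len → Pre_split_and_filter_id_rows rows part_2_start total_len → Spec_split_and_filter_id_rows rows part_2_start total_len (split_and_filter_id_rows rows part_2_start total_len)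

-- ===== LEMMAS AND PROOFS =====
-- A's loop body on one row equals running the dedup step over that row's candidates
theorem pvStepA_eq_dedup (p2 tl : Int) (st : PySem.Set (Option Int) × List (List (Option Int)))
    (row : List (Option Int)) :
    pvStepA p2 tl st row = (pvCandRow p2 tl row).foldl pvDedupStep st := by
  unfold pvStepA pvCandRow
  cases h0 : PySem.List.pyGet? row 0 with
  | none => rfl
  | some t1id =>
    simp only [List.foldl]
    cases h2 : PySem.List.pyGet? row p2 with
    | none =>
      simp [pvDedupStep]
    | some t2id =>
      by_cases ht : pvTruthy t2id = true
      · simp [pvDedupStep, ht]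
      · simp [pvDedupStep, ht]

-- folding A's loop over rows equals deduping the concatenated candidate stream, for any state
theorem pvFold_eq (p2 tl : Int) (rows : List (List (Option Int)))
    (st : PySem.Set (Option Int) × List (List (Option Int))) :
    rows.foldl (pvStepA p2 tl) st
      = (rows.flatMap (pvCandRow p2 tl)).foldl pvDedupStep st := by
  induction rows generalizing st with
  | nil => rfl
  | cons row rows ih =>
    simp only [List.foldl_cons, List.flatMap_cons, List.foldl_append]
    rw [pvStepA_eq_dedup, ih]

-- ===== VERDICT (by name: the statement is the Claim_ definition above) =====
theorem split_and_filter_id_rows_spec : Claim_equal_split_and_filter_id_rows := by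
  intro rows p2 tl _ _
  unfold Spec_split_and_filter_id_rows split_and_filter_id_rows split_and_filter_id_rows_alt
  rw [pvFold_eq]
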